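-- pv_equiv track=rewrite | github.com/Kurman11/algorithm | 프로그래머스/2/72411. 메뉴 리뉴얼/메뉴 리뉴얼.py | solution
-- ===== SOURCE A (Python) =====
-- from itertools import combinations
--
-- def solution(orders, course):
--     answer = []
--     length_filter = {}
--     for order in orders:
--         for i in range(2, len(order) + 1):
--             for j in combinations(order, i):
--                 word = ''.join(sorted(list(j)))
--                 if word in length_filter:
--                     length_filter[word] += 1
--                 else:
--                     length_filter[word] = 1
--
--     length_list = sorted(length_filter.items(), key=lambda x:x[1], reverse=True)
--     length_dict = {}
--
--     for tupl in length_list: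
--         if tupl[1] < 2:
--             continue
--         length = len(tupl[0])
--         if length not in course:
--             continue
--         if length in length_dict:
--             if length_dict[length] == tupl[1]:
--                 answer.append(tupl[0])
--         else:
--             length_dict[length] = tupl[1]
--             answer.append(tupl[0])
--
--     answer.sort()
--     return answer
-- ===== SOURCE B (Python) =====
-- from itertools import combinations
--
--
-- def solution(orders, course):
--     answer = []
--     maxlen = max(map(len, orders), default=0)
--     for c in set(course):
--         if c < 2 or c > maxlen:
--             continue
--         counter = {}
--         for order in orders:
--             if c <= len(order):
--                 for combo in combinations(order, c):
--                     word = ''.join(sorted(combo))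
--                     counter[word] = counter.get(word, 0) + 1
--         best = max(counter.values(), default=0)
--         if best >= 2:
--             answer += [w for w, n in counter.items() if n == best]
--     return sorted(answer)
-- ===== Notes on version B (the rewrite author's own statement) =====
-- stated objective: faster
-- what changed: B enumerates only the combination sizes that actually appear in course (via set(course)) and selects each size's winners with a single max over that size's counter, instead of A's enumeration of every subset size 2..len(order) for every order followed by a global sort of all counts and a first-hit dictionary scan.
import Mathlib
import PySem

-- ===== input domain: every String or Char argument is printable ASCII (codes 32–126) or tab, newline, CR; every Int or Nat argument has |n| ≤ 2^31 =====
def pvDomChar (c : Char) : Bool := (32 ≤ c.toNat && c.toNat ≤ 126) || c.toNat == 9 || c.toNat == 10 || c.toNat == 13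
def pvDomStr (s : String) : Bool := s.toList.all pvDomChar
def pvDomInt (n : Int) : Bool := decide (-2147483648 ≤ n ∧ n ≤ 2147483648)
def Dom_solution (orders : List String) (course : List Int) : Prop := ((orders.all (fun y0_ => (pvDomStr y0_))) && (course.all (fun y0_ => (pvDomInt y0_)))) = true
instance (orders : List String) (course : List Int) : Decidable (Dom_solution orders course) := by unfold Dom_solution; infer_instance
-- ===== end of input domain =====

-- B enumerates only the combination sizes listed in `course` and takes the per-size maximum
-- count directly, instead of A's enumeration of every size 2..len(order) followed by a global
-- sort of all counts and a first-hit scan. (objective: faster)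

-- ===== PORT A =====
-- ''.join(sorted(list(j))): joining single-character strings is exactly String.ofList of the
-- sorted char list (exact; shared by both ports since both Pythons compute the same expression)
def pvWord (j : List Char) : String := String.ofList (PySem.List.sorted j (fun c => c) false)

-- body of A's second loop ('for tupl in length_list'), state = (answer, length_dict)
def pvAStep (course : List Int) (st : List String × PySem.Dict Int Int) (tupl : String × Int) :
    List String × PySem.Dict Int Int :=
  if tupl.2 < 2 then st
  else if ¬ (PySem.Str.len tupl.1 ∈ course) then st
  else if st.2.contains (PySem.Str.len tupl.1) then
    (if st.2.getD (PySem.Str.len tupl.1) 0 = tupl.2 then (st.1 ++ [tupl.1], st.2) else st)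
  else (st.1 ++ [tupl.1], st.2.insert (PySem.Str.len tupl.1) tupl.2)

def solution (orders : List String) (course : List Int) : List String :=
  let lengthFilter : PySem.Dict String Int :=
    orders.foldl (fun d order =>
      (PySem.List.pyRange 2 (PySem.Str.len order + 1) 1).foldl (fun d i =>
        (PySem.List.combinations order.toList i.toNat).foldl (fun d j =>
          if d.contains (pvWord j) then d.insert (pvWord j) (d.getD (pvWord j) 0 + 1)
          else d.insert (pvWord j) 1) d) d)
      PySem.Dict.empty
  let lengthList := PySem.List.sorted lengthFilter.items (fun x => x.2) true
  let res := lengthList.foldl (pvAStep course) ([], PySem.Dict.empty)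
  PySem.List.sorted res.1 (fun x => x) false

-- ===== PORT B =====
-- body of B's outer loop ('for c in set(course)'); maxlen = max(map(len, orders), default=0)
def pvCourseStep (orders : List String) (maxlen : Int) (answer : List String) (c : Int) :
    List String :=
  if c < 2 ∨ maxlen < c then answer
  else
    let counter : PySem.Dict String Int :=
      orders.foldl (fun d order =>
        if c ≤ PySem.Str.len order then
          (PySem.List.combinations order.toList c.toNat).foldl (fun d combo =>
            d.insert (pvWord combo) (d.getD (pvWord combo) 0 + 1)) d
        else d)
        PySem.Dict.empty
    let best := PySem.List.maxD counter.values (fun v => v) 0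
    if 2 ≤ best then answer ++ (counter.items.filter (fun p => p.2 == best)).map (fun p => p.1)
    else answer

def solution_alt (orders : List String) (course : List Int) : List String :=
  let maxlen := PySem.List.maxD (orders.map (fun o => PySem.Str.len o)) (fun v => v) 0
  PySem.List.sorted ((PySem.Set.ofList course).foldl (pvCourseStep orders maxlen) [])
    (fun x => x) false

-- ===== PRECONDITION & SPEC =====
def Spec_solution (orders : List String) (course : List Int) (out : List String) : Prop := out = solution_alt orders course
instance (orders : List String) (course : List Int) (out : List String) : Decidable (Spec_solution orders course out) := by unfold Spec_solution; infer_instance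

-- ===== CLAIM (what is proved, stated in full; the proofs are below) =====
def Claim_equal_solution : Prop := ∀ (orders : List String) (course : List Int), Dom_solution orders course → Spec_solution orders course (solution orders course)

-- ===== LEMMAS AND PROOFS =====

-- words produced from the size-r combinations of one order
def pvCombWords (o : List Char) (r : Nat) : List String :=
  (PySem.List.combinations o r).map pvWord

-- the multiset of words B counts for one size r
def pvStreamB (orders : List String) (r : Nat) : List String :=
  orders.flatMap (fun o => pvCombWords o.toList r)

-- the multiset of words A counts (all sizes 2..len(order))
def pvStreamA (orders : List String) : List String :=
  orders.flatMap (fun o =>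
    (PySem.List.pyRange 2 (PySem.Str.len o + 1) 1).flatMap (fun i => pvCombWords o.toList i.toNat))

-- the counting fold both programs use
def pvCount (S : List String) : PySem.Dict String Int :=
  S.foldl (fun d w => d.insert w (d.getD w 0 + 1)) PySem.Dict.empty

-- the value of the first pair of the given length, and the reference value A's scan compares with
def pvFirst (l : List (String × Int)) (L : Int) : Option Int :=
  (l.find? (fun p => PySem.Str.len p.1 == L)).map (fun p => p.2)

def pvRef (ld : PySem.Dict Int Int) (l : List (String × Int)) (L : Int) : Option Int :=
  match ld.get? L with
  | some v => some v
  | none => pvFirst l L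

def pvCond (course : List Int) (ld : PySem.Dict Int Int) (l : List (String × Int))
    (p : String × Int) : Bool :=
  decide (2 ≤ p.2) && decide (PySem.Str.len p.1 ∈ course) &&
    (pvRef ld l (PySem.Str.len p.1) == some p.2)

-- the words B emits for one course size c
def pvBList (orders : List String) (c : Int) : List String :=
  if c < 2 then []
  else
    let counter := pvCount (pvStreamB orders c.toNat)
    let best := PySem.List.maxD counter.values (fun v => v) 0
    if 2 ≤ best then (counter.items.filter (fun p => p.2 == best)).map (fun p => p.1) else []

-- the common characterisation: w is selected iff its size is ordered, it occurs, and its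
-- count is ≥ 2 and maximal among the words of its size
def pvGood (orders : List String) (course : List Int) (w : String) : Prop :=
  2 ≤ w.toList.length ∧ ((w.toList.length : Int) ∈ course) ∧
  w ∈ pvStreamB orders w.toList.length ∧
  2 ≤ (pvStreamB orders w.toList.length).count w ∧
  ∀ w' ∈ pvStreamB orders w.toList.length,
    (pvStreamB orders w.toList.length).count w' ≤ (pvStreamB orders w.toList.length).count w

-- ---- generic facts about the counting fold ----
theorem pvWord_len (j : List Char) : (pvWord j).toList.length = j.length := by
  simp [pvWord, PySem.List.length_sorted]

theorem pvCount_getD (S : List String) (w : String) :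
    (pvCount S).getD w 0 = (S.count w : Int) := by
  simp [pvCount, PySem.Dict.getD_foldl_insert_add_one]

theorem pvCount_keys (S : List String) : (pvCount S).keys = PySem.Set.ofList S := by
  rw [pvCount, PySem.Dict.keys_foldl_insert]
  simp [PySem.Set.ofList_eq_foldl, PySem.Set.update]

theorem pvCount_keys_nodup (S : List String) : (pvCount S).keys.Nodup := by
  rw [pvCount_keys]; exact PySem.Set.nodup_ofList S

theorem pvCount_items (S : List String) :
    (pvCount S).items = (PySem.Set.ofList S).map (fun k => (k, (S.count k : Int))) := by
  rw [PySem.Dict.items_eq_map_keys _ (pvCount_keys_nodup S) 0, pvCount_keys]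
  exact List.map_congr_left (fun k _ => by rw [pvCount_getD])

-- ---- stream facts ----
theorem pvCombWords_len (o : List Char) (r : Nat) (w : String) (h : w ∈ pvCombWords o r) :
    w.toList.length = r := by
  obtain ⟨j, hj, rfl⟩ := List.mem_map.mp h
  rw [pvWord_len]
  exact PySem.List.length_of_mem_combinations hj

theorem pvStreamB_len (orders : List String) (r : Nat) (w : String)
    (h : w ∈ pvStreamB orders r) : w.toList.length = r := by
  obtain ⟨o, _, hw⟩ := List.mem_flatMap.mp h
  exact pvCombWords_len _ _ _ hw

theorem pvCombWords_count_ne (o : List Char) (r : Nat) (w : String)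
    (h : w.toList.length ≠ r) : (pvCombWords o r).count w = 0 :=
  List.count_eq_zero.mpr (fun hm => h (pvCombWords_len o r w hm))

theorem pvCount_range (o : List Char) (w : String) (a b : Int) (ha : 0 ≤ a) :
    ((PySem.List.pyRange a b 1).flatMap (fun i => pvCombWords o i.toNat)).count w
      = if a ≤ (w.toList.length : Int) ∧ (w.toList.length : Int) < b
        then (pvCombWords o w.toList.length).count w else 0 := by
  by_cases hab : a < b
  · rw [PySem.List.pyRange_one_cons hab, List.flatMap_cons, List.count_append,
      pvCount_range o w (a + 1) b (by omega)]
    by_cases hw : (w.toList.length : Int) = a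
    · have hL : a.toNat = w.toList.length := by omega
      rw [hL]
      split_ifs <;> omega
    · rw [pvCombWords_count_ne o a.toNat w (by omega)]
      split_ifs <;> omega
  · rw [PySem.List.pyRange_one_eq_nil (by omega)]
    simp
    omega
termination_by (b - a).toNat
decreasing_by omega

theorem pvStreamA_count (orders : List String) (w : String) (h : 2 ≤ w.toList.length) :
    (pvStreamA orders).count w = (pvStreamB orders w.toList.length).count w := by
  rw [pvStreamA, pvStreamB, List.count_flatMap, List.count_flatMap]
  congr 1
  apply List.map_congr_left
  intro o _
  simp only [Function.comp_apply]
  have hol : o.toList.length = o.length := by simp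
  rw [pvCount_range o.toList w 2 (PySem.Str.len o + 1) (by omega)]
  by_cases hle : w.toList.length ≤ o.toList.length
  · rw [if_pos (by simp only [PySem.Str.len_eq]; omega)]
  · rw [if_neg (by simp only [PySem.Str.len_eq]; omega), pvCombWords,
      PySem.List.combinations_eq_nil_of_length_lt
        (xs := o.toList) (r := w.toList.length) (by omega)]
    simp

theorem pvStreamA_len (orders : List String) (w : String) (h : w ∈ pvStreamA orders) :
    2 ≤ w.toList.length := by
  obtain ⟨o, _, hw⟩ := List.mem_flatMap.mp h
  obtain ⟨i, hi, hw2⟩ := List.mem_flatMap.mp hw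
  have h2 : 2 ≤ i := (PySem.List.mem_pyRange_one.mp hi).1
  have := pvCombWords_len _ _ _ hw2
  omega

theorem pvStreamA_mem_iff (orders : List String) (w : String) :
    w ∈ pvStreamA orders ↔ 2 ≤ w.toList.length ∧ w ∈ pvStreamB orders w.toList.length := by
  constructor
  · intro h
    have h2 := pvStreamA_len orders w h
    refine ⟨h2, ?_⟩
    rw [← List.count_pos_iff, ← pvStreamA_count orders w h2]
    exact List.count_pos_iff.mpr h
  · rintro ⟨h2, hm⟩
    rw [← List.count_pos_iff, pvStreamA_count orders w h2]
    exact List.count_pos_iff.mpr hm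

-- ---- A's scan ----
theorem pvFirst_cons_of_ne (p : String × Int) (t : List (String × Int)) (L : Int)
    (h : PySem.Str.len p.1 ≠ L) : pvFirst (p :: t) L = pvFirst t L := by
  rw [pvFirst, List.find?_cons_of_neg (by simpa using h), pvFirst]

theorem pvFirst_cons_self (p : String × Int) (t : List (String × Int)) :
    pvFirst (p :: t) (PySem.Str.len p.1) = some p.2 := by
  rw [pvFirst, List.find?_cons_of_pos (by simp)]
  rfl

theorem pvRef_cons_of_ne (ld : PySem.Dict Int Int) (p : String × Int) (t : List (String × Int))
    (L : Int) (h : PySem.Str.len p.1 ≠ L) : pvRef ld (p :: t) L = pvRef ld t L := by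
  rw [pvRef, pvRef, pvFirst_cons_of_ne p t L h]

theorem pvScan_eq (course : List Int) (l : List (String × Int)) (ans : List String)
    (ld : PySem.Dict Int Int) (hdesc : l.Pairwise (fun a b => b.2 ≤ a.2)) :
    (l.foldl (pvAStep course) (ans, ld)).1
      = ans ++ (l.filter (pvCond course ld l)).map (fun p => p.1) := by
  induction l generalizing ans ld with
  | nil => simp
  | cons p t ih =>
    obtain ⟨hdom, hdesc'⟩ := List.pairwise_cons.mp hdesc
    rw [List.foldl_cons, List.filter_cons]
    by_cases h2 : p.2 < 2
    · have hstep : pvAStep course (ans, ld) p = (ans, ld) := by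
        unfold pvAStep; rw [if_pos h2]
      have hcond : pvCond course ld (p :: t) p = false := by
        have hd : decide (2 ≤ p.2) = false := by simp; omega
        simp only [pvCond, hd, Bool.false_and]
      rw [hstep, hcond, ih ans ld hdesc']
      congr 2
      apply List.filter_congr
      intro q hq
      by_cases hq2 : 2 ≤ q.2
      · exact absurd (hdom q hq) (by omega)
      · have hd : decide (2 ≤ q.2) = false := by simpa using hq2
        simp only [pvCond, hd, Bool.false_and]
    · have hd2 : decide (2 ≤ p.2) = true := decide_eq_true (by omega)
      by_cases hc : PySem.Str.len p.1 ∈ course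
      · have hdc : decide (PySem.Str.len p.1 ∈ course) = true := decide_eq_true hc
        cases hg : ld.get? (PySem.Str.len p.1) with
        | some v =>
          have hcont : ld.contains (PySem.Str.len p.1) = true := by
            rw [PySem.Dict.contains_eq_isSome_get?, hg]; rfl
          have hgetD : ld.getD (PySem.Str.len p.1) 0 = v := by
            rw [PySem.Dict.getD_eq_get?_getD, hg]; rfl
          have hfilt : t.filter (pvCond course ld (p :: t)) = t.filter (pvCond course ld t) := by
            apply List.filter_congr; intro q hq
            by_cases hlen : PySem.Str.len q.1 = PySem.Str.len p.1
            · simp only [pvCond, pvRef, hlen, hg]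
            · have e1 := pvRef_cons_of_ne ld p t (PySem.Str.len q.1) (fun hh => hlen hh.symm)
              simp only [pvCond, e1]
          by_cases hv : v = p.2
          · have hstep : pvAStep course (ans, ld) p = (ans ++ [p.1], ld) := by
              unfold pvAStep
              rw [if_neg h2, if_neg (by simpa using hc), if_pos hcont,
                if_pos (by rw [hgetD]; exact hv)]
            have hcond : pvCond course ld (p :: t) p = true := by
              simp only [pvCond, pvRef, hg, hd2, hdc, Bool.true_and, hv, beq_self_eq_true]
            rw [hstep, hcond, ih _ _ hdesc', hfilt]
            simp
          · have hstep : pvAStep course (ans, ld) p = (ans, ld) := by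
              unfold pvAStep
              rw [if_neg h2, if_neg (by simpa using hc), if_pos hcont,
                if_neg (by rw [hgetD]; exact hv)]
            have hcond : pvCond course ld (p :: t) p = false := by
              have : (some v == some p.2) = false := by simpa using hv
              simp only [pvCond, pvRef, hg, this, Bool.and_false]
            rw [hstep, hcond, ih _ _ hdesc', hfilt]
            simp
        | none =>
          have hcont : ld.contains (PySem.Str.len p.1) = false := by
            rw [PySem.Dict.contains_eq_isSome_get?, hg]; rfl
          have hstep : pvAStep course (ans, ld) p
              = (ans ++ [p.1], ld.insert (PySem.Str.len p.1) p.2) := by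
            unfold pvAStep
            rw [if_neg h2, if_neg (by simpa using hc),
              if_neg (by rw [hcont]; exact Bool.false_ne_true)]
          have hcond : pvCond course ld (p :: t) p = true := by
            simp only [pvCond, pvRef, hg, pvFirst_cons_self, hd2, hdc, Bool.true_and,
              beq_self_eq_true]
          have hfilt : t.filter (pvCond course ld (p :: t))
              = t.filter (pvCond course (ld.insert (PySem.Str.len p.1) p.2) t) := by
            apply List.filter_congr; intro q hq
            by_cases hlen : PySem.Str.len q.1 = PySem.Str.len p.1
            · simp only [pvCond, pvRef, hlen, hg, PySem.Dict.get?_insert_self,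
                pvFirst_cons_self]
            · have e1 := pvRef_cons_of_ne ld p t (PySem.Str.len q.1) (fun hh => hlen hh.symm)
              have e3 : pvRef (ld.insert (PySem.Str.len p.1) p.2) t (PySem.Str.len q.1)
                  = pvRef ld t (PySem.Str.len q.1) := by
                simp only [pvRef, PySem.Dict.get?_insert_of_ne ld p.2 hlen]
              simp only [pvCond, e1, e3]
          rw [hstep, hcond, ih _ _ hdesc', hfilt]
          simp
      · have hdc : decide (PySem.Str.len p.1 ∈ course) = false := by simpa using hc
        have hstep : pvAStep course (ans, ld) p = (ans, ld) := by
          unfold pvAStep; rw [if_neg h2, if_pos (by simpa using hc)]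
        have hcond : pvCond course ld (p :: t) p = false := by
          simp only [pvCond, hdc, Bool.and_false, Bool.false_and]
        rw [hstep, hcond, ih ans ld hdesc']
        congr 2
        apply List.filter_congr
        intro q hq
        by_cases hlen : PySem.Str.len q.1 = PySem.Str.len p.1
        · have hd : decide (PySem.Str.len q.1 ∈ course) = false := by
            rw [hlen]; simpa using hc
          simp only [pvCond, hd, Bool.and_false, Bool.false_and]
        · have e1 := pvRef_cons_of_ne ld p t (PySem.Str.len q.1) (fun hh => hlen hh.symm)
          simp only [pvCond, e1]

theorem pvFirst_eq_iff (l : List (String × Int)) (L : Int)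
    (hdesc : l.Pairwise (fun a b => b.2 ≤ a.2)) (p : String × Int) (hp : p ∈ l)
    (hL : PySem.Str.len p.1 = L) :
    pvFirst l L = some p.2 ↔ ∀ q ∈ l, PySem.Str.len q.1 = L → q.2 ≤ p.2 := by
  induction l with
  | nil => cases hp
  | cons h t ih =>
    obtain ⟨hdom, hdesc'⟩ := List.pairwise_cons.mp hdesc
    by_cases hh : PySem.Str.len h.1 = L
    · have hf : pvFirst (h :: t) L = some h.2 := by rw [← hh]; exact pvFirst_cons_self h t
      rw [hf]
      constructor
      · intro he q hq hqL
        have hpe : h.2 = p.2 := by injection he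
        rcases List.mem_cons.mp hq with rfl | hqt
        · omega
        · have := hdom q hqt; omega
      · intro hall
        have h1 : h.2 ≤ p.2 := hall h List.mem_cons_self hh
        have h2 : p.2 ≤ h.2 := by
          rcases List.mem_cons.mp hp with rfl | hpt
          · exact le_refl _
          · exact hdom p hpt
        rw [le_antisymm h1 h2]
    · have hf : pvFirst (h :: t) L = pvFirst t L := pvFirst_cons_of_ne h t L hh
      have hpt : p ∈ t := by
        rcases List.mem_cons.mp hp with rfl | hpt
        · exact absurd hL hh
        · exact hpt
      rw [hf, ih hdesc' hpt]
      constructor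
      · intro hall q hq hqL
        rcases List.mem_cons.mp hq with rfl | hqt
        · exact absurd hqL hh
        · exact hall q hqt hqL
      · intro hall q hq hqL
        exact hall q (List.mem_cons_of_mem h hq) hqL

-- A's counting loop builds exactly the counter of its word stream
theorem pvDictA_eq (orders : List String) :
    (orders.foldl (fun d order =>
      (PySem.List.pyRange 2 (PySem.Str.len order + 1) 1).foldl (fun d i =>
        (PySem.List.combinations order.toList i.toNat).foldl (fun d j =>
          if d.contains (pvWord j) then d.insert (pvWord j) (d.getD (pvWord j) 0 + 1)
          else d.insert (pvWord j) 1) d) d)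
      PySem.Dict.empty) = pvCount (pvStreamA orders) := by
  rw [pvCount, pvStreamA, List.foldl_flatMap]
  apply PySem.List.foldl_congr_mem
  intro d o _
  rw [List.foldl_flatMap]
  apply PySem.List.foldl_congr_mem
  intro d i _
  rw [pvCombWords, List.foldl_map]
  apply PySem.List.foldl_congr_mem
  intro d j _
  by_cases hcont : d.contains (pvWord j)
  · rw [if_pos hcont]
  · rw [if_neg hcont, PySem.Dict.getD_of_not_contains d 0 (by simpa using hcont)]
    norm_num

theorem pvSolution_eq (orders : List String) (course : List Int) :
    solution orders course
      = PySem.List.sorted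
          (((PySem.List.sorted (pvCount (pvStreamA orders)).items (fun x => x.2) true).foldl
              (pvAStep course) ([], PySem.Dict.empty)).1) (fun x => x) false := by
  unfold solution
  rw [pvDictA_eq]

theorem pvMemA (orders : List String) (course : List Int) (w : String) :
    w ∈ ((PySem.List.sorted (pvCount (pvStreamA orders)).items (fun x => x.2) true).foldl
          (pvAStep course) ([], PySem.Dict.empty)).1
      ↔ pvGood orders course w := by
  have hdesc : (PySem.List.sorted (pvCount (pvStreamA orders)).items (fun x => x.2) true).Pairwise
      (fun a b => b.2 ≤ a.2) := PySem.List.sorted_pairwise_rev _ _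
  have hperm := PySem.List.sorted_perm (pvCount (pvStreamA orders)).items (fun x => x.2) true
  have hmemitems : ∀ p : String × Int,
      p ∈ PySem.List.sorted (pvCount (pvStreamA orders)).items (fun x => x.2) true
        ↔ ∃ k, k ∈ pvStreamA orders ∧ p = (k, ((pvStreamA orders).count k : Int)) := by
    intro p
    rw [hperm.mem_iff, pvCount_items]
    simp only [List.mem_map]
    constructor
    · rintro ⟨k, hk, rfl⟩; exact ⟨k, (PySem.Set.mem_ofList _ k).mp hk, rfl⟩
    · rintro ⟨k, hk, rfl⟩; exact ⟨k, (PySem.Set.mem_ofList _ k).mpr hk, rfl⟩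
  rw [pvScan_eq course _ [] PySem.Dict.empty hdesc]
  simp only [List.nil_append, List.mem_map, List.mem_filter]
  have hrefempty : ∀ (l : List (String × Int)) (L : Int),
      pvRef PySem.Dict.empty l L = pvFirst l L := by
    intro l L; rw [pvRef, PySem.Dict.get?_empty]
  constructor
  · rintro ⟨p, ⟨hpmem, hcond⟩, rfl⟩
    obtain ⟨k, hkS, hpk⟩ := (hmemitems p).mp hpmem
    simp only [pvCond, hrefempty, Bool.and_eq_true, decide_eq_true_eq, beq_iff_eq] at hcond
    obtain ⟨⟨hc2, hccourse⟩, hcfirst⟩ := hcond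
    have hmax := (pvFirst_eq_iff _ _ hdesc p hpmem rfl).mp hcfirst
    have hlen2 : 2 ≤ p.1.toList.length := by
      rw [hpk]; exact pvStreamA_len orders k hkS
    have hmemB : p.1 ∈ pvStreamB orders p.1.toList.length := by
      rw [hpk]
      exact ((pvStreamA_mem_iff orders k).mp hkS).2
    have hcnt : (pvStreamA orders).count p.1 = (pvStreamB orders p.1.toList.length).count p.1 :=
      pvStreamA_count orders p.1 hlen2
    have hp2 : p.2 = ((pvStreamA orders).count p.1 : Int) := by rw [hpk]
    refine ⟨hlen2, ?_, hmemB, ?_, ?_⟩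
    · have hsl : PySem.Str.len p.1 = (p.1.toList.length : Int) := by simp
      rwa [hsl] at hccourse
    · rw [← hcnt]
      rw [hp2] at hc2
      exact_mod_cast hc2
    · intro w' hw'
      have hw'len : w'.toList.length = p.1.toList.length := pvStreamB_len _ _ _ hw'
      have hw'A : w' ∈ pvStreamA orders := by
        rw [pvStreamA_mem_iff]
        refine ⟨by omega, by rwa [hw'len]⟩
      have hq : (w', ((pvStreamA orders).count w' : Int))
          ∈ PySem.List.sorted (pvCount (pvStreamA orders)).items (fun x => x.2) true :=
        (hmemitems _).mpr ⟨w', hw'A, rfl⟩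
      have hle' := hmax _ hq (by simp [hw'len])
      rw [hp2] at hle'
      have hle : (pvStreamA orders).count w' ≤ (pvStreamA orders).count p.1 := by
        simpa using hle'
      have hcnt' : (pvStreamA orders).count w'
          = (pvStreamB orders p.1.toList.length).count w' := by
        rw [← hw'len]
        exact pvStreamA_count orders w' (by omega)
      rw [← hcnt, ← hcnt']
      exact hle
  · rintro ⟨hlen2, hcourse, hmemB, hcnt2, hmaxB⟩
    have hkA : w ∈ pvStreamA orders := (pvStreamA_mem_iff orders w).mpr ⟨hlen2, hmemB⟩
    have hcnt : (pvStreamA orders).count w = (pvStreamB orders w.toList.length).count w :=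
      pvStreamA_count orders w hlen2
    refine ⟨(w, ((pvStreamA orders).count w : Int)), ⟨(hmemitems _).mpr ⟨w, hkA, rfl⟩, ?_⟩, rfl⟩
    simp only [pvCond, hrefempty, Bool.and_eq_true, decide_eq_true_eq, beq_iff_eq]
    refine ⟨⟨?_, ?_⟩, ?_⟩
    · rw [hcnt]; exact_mod_cast hcnt2
    · simpa using hcourse
    · refine (pvFirst_eq_iff _ _ hdesc _ ((hmemitems _).mpr ⟨w, hkA, rfl⟩) rfl).mpr ?_
      intro q hq hqL
      obtain ⟨k', hk'A, rfl⟩ := (hmemitems q).mp hq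
      have hk'len : k'.toList.length = w.toList.length := by
        simp only [PySem.Str.len_eq] at hqL
        have e1 : k'.length = k'.toList.length := by simp
        have e2 : w.length = w.toList.length := by simp
        omega
      have hk'B : k' ∈ pvStreamB orders w.toList.length := by
        rw [← hk'len]
        exact ((pvStreamA_mem_iff orders k').mp hk'A).2
      have hle := hmaxB k' hk'B
      have hcnt' : (pvStreamA orders).count k'
          = (pvStreamB orders w.toList.length).count k' := by
        rw [← hk'len]
        exact pvStreamA_count orders k' (by omega)
      simp only []
      rw [hcnt', hcnt]
      exact_mod_cast hle

theorem pvNodupA (orders : List String) (course : List Int) :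
    (((PySem.List.sorted (pvCount (pvStreamA orders)).items (fun x => x.2) true).foldl
        (pvAStep course) ([], PySem.Dict.empty)).1).Nodup := by
  have hdesc : (PySem.List.sorted (pvCount (pvStreamA orders)).items (fun x => x.2) true).Pairwise
      (fun a b => b.2 ≤ a.2) := PySem.List.sorted_pairwise_rev _ _
  rw [pvScan_eq course _ [] PySem.Dict.empty hdesc, List.nil_append]
  have hsub : (((PySem.List.sorted (pvCount (pvStreamA orders)).items (fun x => x.2) true).filter
        (pvCond course PySem.Dict.empty
          (PySem.List.sorted (pvCount (pvStreamA orders)).items (fun x => x.2) true))).map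
        (fun p => p.1)).Sublist
      (((PySem.List.sorted (pvCount (pvStreamA orders)).items (fun x => x.2) true).map
        (fun p => p.1))) :=
    List.Sublist.map (fun p : String × Int => p.1) List.filter_sublist
  apply hsub.nodup
  have hperm := (PySem.List.sorted_perm (pvCount (pvStreamA orders)).items
    (fun x => x.2) true).map (fun p => p.1)
  rw [hperm.nodup_iff]
  exact pvCount_keys_nodup (pvStreamA orders)

-- ---- B's selection ----
-- B's counting loop builds exactly the counter of its word stream
theorem pvDictB_eq (orders : List String) (c : Int) (hc : 2 ≤ c) :
    (orders.foldl (fun d order =>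
      if c ≤ PySem.Str.len order then
        (PySem.List.combinations order.toList c.toNat).foldl (fun d combo =>
          d.insert (pvWord combo) (d.getD (pvWord combo) 0 + 1)) d
      else d) PySem.Dict.empty)
      = pvCount (pvStreamB orders c.toNat) := by
  rw [pvCount, pvStreamB, List.foldl_flatMap]
  apply PySem.List.foldl_congr_mem
  intro d o _
  by_cases hlen : c ≤ PySem.Str.len o
  · rw [if_pos hlen, pvCombWords, List.foldl_map]
  · have hol : o.toList.length = o.length := by simp
    rw [PySem.Str.len_eq] at hlen
    rw [if_neg (by rw [PySem.Str.len_eq]; exact hlen), pvCombWords,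
      PySem.List.combinations_eq_nil_of_length_lt
        (xs := o.toList) (r := c.toNat) (by omega)]
    simp

theorem pvLeMaxD (xs : List Int) (x : Int) (h : x ∈ xs) :
    x ≤ PySem.List.maxD xs (fun v => v) 0 := by
  rw [PySem.List.maxD]
  cases hm : PySem.List.max? xs (fun v => v) with
  | none =>
    rw [(PySem.List.max?_eq_none_iff _ _).mp hm] at h
    cases h
  | some m => exact PySem.List.max?_isMax hm _ h

theorem pvStreamB_nil (orders : List String) (c : Int) (hc : 2 ≤ c)
    (hm : ∀ o ∈ orders, PySem.Str.len o < c) : pvStreamB orders c.toNat = [] := by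
  rw [pvStreamB, List.flatMap_eq_nil_iff]
  intro o ho
  have := hm o ho
  rw [PySem.Str.len_eq] at this
  have hol : o.toList.length = o.length := by simp
  rw [pvCombWords, PySem.List.combinations_eq_nil_of_length_lt
    (xs := o.toList) (r := c.toNat) (by omega)]
  rfl

theorem pvValues_eq (S : List String) :
    (pvCount S).values = (PySem.Set.ofList S).map (fun k => (S.count k : Int)) := by
  rw [PySem.Dict.values_eq_map_keys _ (pvCount_keys_nodup S) 0, pvCount_keys]
  exact List.map_congr_left (fun k _ => pvCount_getD S k)

theorem pvBest_isMax (S : List String) (w' : String) (hw' : w' ∈ S) :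
    (S.count w' : Int) ≤ PySem.List.maxD (pvCount S).values (fun v => v) 0 := by
  have hmem : (S.count w' : Int) ∈ (pvCount S).values := by
    rw [pvValues_eq]
    exact List.mem_map.mpr ⟨w', (PySem.Set.mem_ofList S w').mpr hw', rfl⟩
  rw [PySem.List.maxD]
  cases hm : PySem.List.max? (pvCount S).values (fun v => v) with
  | none =>
    rw [(PySem.List.max?_eq_none_iff _ _).mp hm] at hmem
    cases hmem
  | some m =>
    exact PySem.List.max?_isMax hm _ hmem

theorem pvBest_eq (S : List String) (w : String) (hw : w ∈ S)
    (hmax : ∀ w' ∈ S, S.count w' ≤ S.count w) :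
    PySem.List.maxD (pvCount S).values (fun v => v) 0 = (S.count w : Int) := by
  refine le_antisymm ?_ (pvBest_isMax S w hw)
  rw [PySem.List.maxD]
  cases hm : PySem.List.max? (pvCount S).values (fun v => v) with
  | none =>
    have hmem : (S.count w : Int) ∈ (pvCount S).values := by
      rw [pvValues_eq]
      exact List.mem_map.mpr ⟨w, (PySem.Set.mem_ofList S w).mpr hw, rfl⟩
    rw [(PySem.List.max?_eq_none_iff _ _).mp hm] at hmem
    cases hmem
  | some m =>
    have hmmem : m ∈ (pvCount S).values := PySem.List.max?_mem hm
    rw [pvValues_eq] at hmmem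
    obtain ⟨k', hk', rfl⟩ := List.mem_map.mp hmmem
    have : S.count k' ≤ S.count w := hmax k' ((PySem.Set.mem_ofList S k').mp hk')
    simpa using this

theorem pvBList_mem (orders : List String) (c : Int) (w : String) :
    w ∈ pvBList orders c
      ↔ 2 ≤ c ∧ w ∈ pvStreamB orders c.toNat ∧
        2 ≤ (pvStreamB orders c.toNat).count w ∧
        ∀ w' ∈ pvStreamB orders c.toNat,
          (pvStreamB orders c.toNat).count w' ≤ (pvStreamB orders c.toNat).count w := by
  rw [pvBList]
  by_cases hc : c < 2
  · rw [if_pos hc]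
    simp only [List.not_mem_nil, false_iff]
    rintro ⟨h2, _⟩
    omega
  · rw [if_neg hc]
    constructor
    · intro hw
      by_cases hb : 2 ≤ PySem.List.maxD (pvCount (pvStreamB orders c.toNat)).values
          (fun v => v) 0
      · rw [if_pos hb] at hw
        obtain ⟨p, hpf, rfl⟩ := List.mem_map.mp hw
        obtain ⟨hpmem, hpeq⟩ := List.mem_filter.mp hpf
        rw [pvCount_items] at hpmem
        obtain ⟨k, hkset, rfl⟩ := List.mem_map.mp hpmem
        have hkS : k ∈ pvStreamB orders c.toNat :=
          (PySem.Set.mem_ofList _ k).mp hkset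
        have hpeq' : ((pvStreamB orders c.toNat).count k : Int)
            = PySem.List.maxD (pvCount (pvStreamB orders c.toNat)).values (fun v => v) 0 := by
          simpa using hpeq
        refine ⟨by omega, hkS, ?_, ?_⟩
        · have : (2 : Int) ≤ ((pvStreamB orders c.toNat).count k : Int) := by
            rw [hpeq']; exact hb
          exact_mod_cast this
        · intro w' hw'
          have := pvBest_isMax (pvStreamB orders c.toNat) w' hw'
          rw [← hpeq'] at this
          exact_mod_cast this
      · rw [if_neg hb] at hw
        cases hw
    · rintro ⟨hc2, hwS, hcnt2, hmax⟩
      have hbeq := pvBest_eq (pvStreamB orders c.toNat) w hwS hmax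
      have hb : 2 ≤ PySem.List.maxD (pvCount (pvStreamB orders c.toNat)).values
          (fun v => v) 0 := by
        rw [hbeq]; exact_mod_cast hcnt2
      rw [if_pos hb]
      apply List.mem_map.mpr
      refine ⟨(w, ((pvStreamB orders c.toNat).count w : Int)), ?_, rfl⟩
      apply List.mem_filter.mpr
      constructor
      · rw [pvCount_items]
        exact List.mem_map.mpr ⟨w, (PySem.Set.mem_ofList _ w).mpr hwS, rfl⟩
      · simp only [hbeq, beq_self_eq_true]

theorem pvBList_nodup (orders : List String) (c : Int) : (pvBList orders c).Nodup := by
  rw [pvBList]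
  by_cases hc : c < 2
  · rw [if_pos hc]; exact List.nodup_nil
  · rw [if_neg hc]
    by_cases hb : 2 ≤ PySem.List.maxD (pvCount (pvStreamB orders c.toNat)).values
        (fun v => v) 0
    · rw [if_pos hb]
      have hsub : (((pvCount (pvStreamB orders c.toNat)).items.filter
            (fun p => p.2 == PySem.List.maxD (pvCount (pvStreamB orders c.toNat)).values
              (fun v => v) 0)).map (fun p => p.1)).Sublist
          ((pvCount (pvStreamB orders c.toNat)).items.map (fun p => p.1)) :=
        List.Sublist.map (fun p : String × Int => p.1) List.filter_sublist
      apply hsub.nodup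
      exact pvCount_keys_nodup (pvStreamB orders c.toNat)
    · rw [if_neg hb]; exact List.nodup_nil

theorem pvBList_len (orders : List String) (c : Int) (w : String) (h : w ∈ pvBList orders c) :
    (w.toList.length : Int) = c := by
  obtain ⟨hc2, hwS, -, -⟩ := (pvBList_mem orders c w).mp h
  have := pvStreamB_len orders c.toNat w hwS
  omega

theorem pvSolutionAlt_eq (orders : List String) (course : List Int) :
    solution_alt orders course
      = PySem.List.sorted ((PySem.Set.ofList course).flatMap (pvBList orders))
          (fun x => x) false := by
  unfold solution_alt
  show PySem.List.sorted ((PySem.Set.ofList course).foldl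
      (pvCourseStep orders
        (PySem.List.maxD (orders.map (fun o => PySem.Str.len o)) (fun v => v) 0)) [])
      (fun x => x) false = _
  congr 1
  set M := PySem.List.maxD (orders.map (fun o => PySem.Str.len o)) (fun v => v) 0 with hM
  have hMle : ∀ o ∈ orders, PySem.Str.len o ≤ M := by
    intro o ho
    exact pvLeMaxD _ _ (List.mem_map.mpr ⟨o, ho, rfl⟩)
  have hstep : ∀ (ans : List String), ∀ c ∈ PySem.Set.ofList course,
      pvCourseStep orders M ans c = ans ++ pvBList orders c := by
    intro ans c _
    rw [pvCourseStep, pvBList]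
    by_cases hc : c < 2
    · rw [if_pos (Or.inl hc), if_pos hc, List.append_nil]
    · by_cases hmx : M < c
      · rw [if_pos (Or.inr hmx), if_neg hc,
          pvStreamB_nil orders c (by omega) (fun o ho => by have := hMle o ho; omega)]
        have hb0 : ¬ (2 : Int) ≤ PySem.List.maxD (pvCount ([] : List String)).values
            (fun v => v) 0 := by decide
        rw [if_neg hb0]
        rw [List.append_nil]
      · rw [if_neg (by omega), if_neg hc, pvDictB_eq orders c (by omega)]
        by_cases hb : 2 ≤ PySem.List.maxD (pvCount (pvStreamB orders c.toNat)).values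
            (fun v => v) 0
        · rw [if_pos hb, if_pos hb]
        · rw [if_neg hb, if_neg hb, List.append_nil]
  rw [PySem.List.foldl_congr_mem (PySem.Set.ofList course) (pvCourseStep orders M)
    (fun ans c => ans ++ pvBList orders c) [] hstep,
    PySem.List.foldl_append_eq_flatMap, List.nil_append]

theorem pvMemB (orders : List String) (course : List Int) (w : String) :
    w ∈ (PySem.Set.ofList course).flatMap (pvBList orders) ↔ pvGood orders course w := by
  rw [List.mem_flatMap]
  constructor
  · rintro ⟨c, hcset, hwb⟩
    obtain ⟨hc2, hwS, hcnt2, hmax⟩ := (pvBList_mem orders c w).mp hwb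
    have hlen : w.toList.length = c.toNat := pvStreamB_len orders c.toNat w hwS
    have hcl : (w.toList.length : Int) = c := by omega
    refine ⟨by omega, ?_, ?_, ?_, ?_⟩ <;> rw [hlen]
    · rw [show ((c.toNat : Nat) : Int) = c from by omega]
      exact (PySem.Set.mem_ofList course c).mp hcset
    · exact hwS
    · exact hcnt2
    · exact hmax
  · rintro ⟨h2, hcourse, hmem, hcnt, hmax⟩
    refine ⟨(w.toList.length : Int), (PySem.Set.mem_ofList course _).mpr hcourse, ?_⟩
    apply (pvBList_mem orders _ w).mpr
    have htn : ((w.toList.length : Int)).toNat = w.toList.length := by omega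
    rw [htn]
    exact ⟨by omega, hmem, hcnt, hmax⟩

theorem pvFlatMap_nodup (l : List Int) (f : Int → List String)
    (hl : l.Nodup) (hf : ∀ c ∈ l, (f c).Nodup)
    (hk : ∀ c ∈ l, ∀ w ∈ f c, (w.toList.length : Int) = c) : (l.flatMap f).Nodup := by
  induction l with
  | nil => simp
  | cons c t ih =>
    rw [List.flatMap_cons]
    apply List.nodup_append.mpr
    refine ⟨hf c List.mem_cons_self, ?_, ?_⟩
    · exact ih (List.nodup_cons.mp hl).2 (fun c' hc' => hf c' (List.mem_cons_of_mem c hc'))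
        (fun c' hc' => hk c' (List.mem_cons_of_mem c hc'))
    · intro w hw1 w2 hw2
      rintro rfl
      obtain ⟨c', hc't, hw2'⟩ := List.mem_flatMap.mp hw2
      have e1 := hk c List.mem_cons_self w hw1
      have e2 := hk c' (List.mem_cons_of_mem c hc't) w hw2'
      have : c = c' := by omega
      exact (List.nodup_cons.mp hl).1 (this ▸ hc't)

theorem pvNodupB (orders : List String) (course : List Int) :
    ((PySem.Set.ofList course).flatMap (pvBList orders)).Nodup :=
  pvFlatMap_nodup _ _ (PySem.Set.nodup_ofList course)
    (fun c _ => pvBList_nodup orders c)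
    (fun c _ w hw => pvBList_len orders c w hw)

-- ===== VERDICT (by name: the statement is the Claim_ definition above) =====
theorem solution_spec : Claim_equal_solution := by
  intro orders course _
  unfold Spec_solution
  rw [pvSolution_eq, pvSolutionAlt_eq]
  apply PySem.List.sorted_eq_sorted_of_perm _ _ _ (fun a b h => h)
  refine (List.perm_ext_iff_of_nodup (pvNodupA orders course) (pvNodupB orders course)).mpr ?_
  intro w
  rw [pvMemA, pvMemB]
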